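-- pv_equiv track=rewrite | github.com/shushuzn/ai_research_os | renderers/litreview.py | _group_by_methodology
-- ===== SOURCE A (Python) =====
-- from typing import List, Dict, Any
--
-- def _group_by_methodology(papers: List[Dict[str, Any]]) -> Dict[str, List[Dict]]:
--     """Group papers by detected methodology keywords."""
--     method_keywords = {
--         "Transformer": ["transformer", "attention", "self-attention", "bert", "gpt"],
--         "CNN/卷积": ["convolution", "cnn", "convolutional", "resnet", "vgg"],
--         "图神经网络": ["graph", "gnn", "gcn", "gat"],
--         "强化学习": ["reinforcement", "rl", "policy", "q-learning", "ddpg"],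
--         "扩散模型": ["diffusion", "ddpm", "score-based", "gan"],
--         "检索增强": ["retrieval", "rag", "retrieval-augmented", "knowledge retrieval"],
--         "多模态": ["multimodal", "vision-language", "image-text", "vqa"],
--         "大语言模型": ["llm", "large language", "foundation model", "gpt-", "claude", "gemini"],
--     }
--
--     groups: Dict[str, List[Dict]] = {}
--     for paper in papers:
--         text = (
--             paper.get("title", "") + " " + paper.get("abstract", "")
--         ).lower()
--
--         for method, keywords in method_keywords.items():
--             if any(kw in text for kw in keywords):
--                 if method not in groups:
--                     groups[method] = []
--                 groups[method].append(paper)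
--                 break
--
--     return groups
-- ===== SOURCE B (Python) =====
-- from typing import List, Dict, Any
--
-- _METHODS = [
--     ("Transformer", ["transformer", "attention", "self-attention", "bert", "gpt"]),
--     ("CNN/卷积", ["convolution", "cnn", "convolutional", "resnet", "vgg"]),
--     ("图神经网络", ["graph", "gnn", "gcn", "gat"]),
--     ("强化学习", ["reinforcement", "rl", "policy", "q-learning", "ddpg"]),
--     ("扩散模型", ["diffusion", "ddpm", "score-based", "gan"]),
--     ("检索增强", ["retrieval", "rag", "retrieval-augmented", "knowledge retrieval"]),
--     ("多模态", ["multimodal", "vision-language", "image-text", "vqa"]),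
--     ("大语言模型", ["llm", "large language", "foundation model", "gpt-", "claude", "gemini"]),
-- ]
--
--
-- def _classify(paper):
--     """First methodology (in the fixed order) whose keyword occurs in title+abstract, or None."""
--     text = (paper.get("title", "") + " " + paper.get("abstract", "")).lower()
--     return next((m for m, kws in _METHODS if any(k in text for k in kws)), None)
--
--
-- def _group_by_methodology(papers: List[Dict[str, Any]]) -> Dict[str, List[Dict]]:
--     """Group papers by detected methodology keywords."""
--     keys = []
--     for p in papers:
--         m = _classify(p)
--         if m is not None and m not in keys:
--             keys.append(m)
--     return {m: [p for p in papers if _classify(p) == m] for m in keys}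
-- ===== Notes on version B (the rewrite author's own statement) =====
-- stated objective: alternative
-- what changed: Two-phase decomposition instead of A's per-paper nested loop with break and in-place dict mutation: a _classify helper computes each paper's first matching methodology, one pass collects the distinct keys in first-occurrence order, and the result dict is then built per key by filtering the papers list.
import Mathlib
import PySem

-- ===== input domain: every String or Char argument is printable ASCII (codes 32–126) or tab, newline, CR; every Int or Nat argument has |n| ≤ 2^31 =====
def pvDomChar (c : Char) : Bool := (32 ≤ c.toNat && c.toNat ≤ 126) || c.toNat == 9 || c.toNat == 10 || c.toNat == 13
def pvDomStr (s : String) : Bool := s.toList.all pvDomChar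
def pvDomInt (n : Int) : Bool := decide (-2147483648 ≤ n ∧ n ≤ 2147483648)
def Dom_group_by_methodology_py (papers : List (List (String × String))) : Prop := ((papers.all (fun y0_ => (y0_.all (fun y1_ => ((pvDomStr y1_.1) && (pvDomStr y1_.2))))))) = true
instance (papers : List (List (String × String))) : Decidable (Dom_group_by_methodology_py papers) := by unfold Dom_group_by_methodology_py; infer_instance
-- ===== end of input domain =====

-- B replaces A's per-paper nested loop with break and in-place dict mutation by a two-phase
-- decomposition (classify each paper, collect key order, then build each group by filtering);
-- objective: alternative (same asymptotic cost, different structure).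

-- ===== PORT A =====
-- the method_keywords table (identical literal in Source A and Source B)
def pvMethodKeywords : List (String × List String) := [
  ("Transformer", ["transformer", "attention", "self-attention", "bert", "gpt"]),
  ("CNN/卷积", ["convolution", "cnn", "convolutional", "resnet", "vgg"]),
  ("图神经网络", ["graph", "gnn", "gcn", "gat"]),
  ("强化学习", ["reinforcement", "rl", "policy", "q-learning", "ddpg"]),
  ("扩散模型", ["diffusion", "ddpm", "score-based", "gan"]),
  ("检索增强", ["retrieval", "rag", "retrieval-augmented", "knowledge retrieval"]),
  ("多模态", ["multimodal", "vision-language", "image-text", "vqa"]),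
  ("大语言模型", ["llm", "large language", "foundation model", "gpt-", "claude", "gemini"])]

-- A's inner 'for method, keywords in …' loop; returning after the update is Python's 'break'.
-- 'groups[method].append(paper)' is ported as read-then-write: insert of getD ++ [paper].
def pvInnerLoopA (paper : List (String × String)) (text : String)
    (groups : PySem.Dict String (List (List (String × String))))
    : List (String × List String) → PySem.Dict String (List (List (String × String)))
  | [] => groups
  | (method, keywords) :: rest =>
    if keywords.any (fun kw => PySem.Str.isIn kw text) then
      let g := if groups.contains method then groups else groups.insert method []
      g.insert method (g.getD method [] ++ [paper])
    else pvInnerLoopA paper text groups rest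

def group_by_methodology_py (papers : List (List (String × String))) : List (String × List (List (String × String))) :=
  (papers.foldl (fun groups paper =>
      let text := PySem.Str.lower ((PySem.Dict.ofList paper).getD "title" "" ++ " " ++ (PySem.Dict.ofList paper).getD "abstract" "")
      pvInnerLoopA paper text groups pvMethodKeywords)
    PySem.Dict.empty).items

-- ===== PORT B =====
-- Source B's _classify: first methodology whose keyword occurs in title+abstract, or None
def pvClassify (paper : List (String × String)) : Option String :=
  let text := PySem.Str.lower ((PySem.Dict.ofList paper).getD "title" "" ++ " " ++ (PySem.Dict.ofList paper).getD "abstract" "")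
  (pvMethodKeywords.find? (fun mk => mk.2.any (fun k => PySem.Str.isIn k text))).map Prod.fst

def group_by_methodology_py_alt (papers : List (List (String × String))) : List (String × List (List (String × String))) :=
  let keys := papers.foldl (fun ks p =>
      match pvClassify p with
      | some m => if m ∈ ks then ks else ks ++ [m]
      | none => ks) ([] : List String)
  keys.map (fun m => (m, papers.filter (fun p => pvClassify p == some m)))

-- ===== PRECONDITION & SPEC =====
def Spec_group_by_methodology_py (papers : List (List (String × String))) (out : List (String × List (List (String × String)))) : Prop := out = group_by_methodology_py_alt papers
instance (papers : List (List (String × String))) (out : List (String × List (List (String × String)))) : Decidable (Spec_group_by_methodology_py papers out) := by unfold Spec_group_by_methodology_py; infer_instance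

-- ===== CLAIM (what is proved, stated in full; the proofs are below) =====
def Claim_equal_group_by_methodology_py : Prop := ∀ (papers : List (List (String × String))), Dom_group_by_methodology_py papers → Spec_group_by_methodology_py papers (group_by_methodology_py papers)

-- ===== LEMMAS AND PROOFS =====

-- proof-side abbreviations
def pvStepK (ks : List String) (p : List (String × String)) : List String :=
  match pvClassify p with
  | some m => if m ∈ ks then ks else ks ++ [m]
  | none => ks

def pvKeys (papers : List (List (String × String))) : List String := papers.foldl pvStepK []

def pvBucket (papers : List (List (String × String))) (m : String) : List (List (String × String)) :=
  papers.filter (fun p => pvClassify p == some m)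

def pvAdd (g : PySem.Dict String (List (List (String × String)))) (m : String) (p : List (String × String)) :
    PySem.Dict String (List (List (String × String))) :=
  let g' := if g.contains m then g else g.insert m []
  g'.insert m (g'.getD m [] ++ [p])

def pvStepA (groups : PySem.Dict String (List (List (String × String)))) (paper : List (String × String)) :
    PySem.Dict String (List (List (String × String))) :=
  let text := PySem.Str.lower ((PySem.Dict.ofList paper).getD "title" "" ++ " " ++ (PySem.Dict.ofList paper).getD "abstract" "")
  pvInnerLoopA paper text groups pvMethodKeywords

-- A's inner loop is classification followed by one dict update
theorem pvInnerLoopA_eq_find (p : List (String × String)) (text : String)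
    (g : PySem.Dict String (List (List (String × String)))) (ms : List (String × List String)) :
    pvInnerLoopA p text g ms =
      match (ms.find? (fun mk => mk.2.any (fun k => PySem.Str.isIn k text))).map Prod.fst with
      | some m => pvAdd g m p
      | none => g := by
  induction ms with
  | nil => rfl
  | cons hd rest ih =>
    obtain ⟨method, keywords⟩ := hd
    simp only [pvInnerLoopA, List.find?_cons]
    cases h : keywords.any (fun k => PySem.Str.isIn k text) with
    | true => simp [pvAdd]
    | false => simpa using ih

theorem pvStepA_eq (g : PySem.Dict String (List (List (String × String)))) (p : List (String × String)) :
    pvStepA g p = match pvClassify p with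
      | some m => pvAdd g m p
      | none => g := by
  show pvInnerLoopA p _ g pvMethodKeywords = _
  rw [pvInnerLoopA_eq_find]
  rfl

theorem pvStepK_none (ks : List String) (p : List (String × String)) (h : pvClassify p = none) :
    pvStepK ks p = ks := by unfold pvStepK; rw [h]

theorem pvStepK_some (ks : List String) (p : List (String × String)) (a : String) (h : pvClassify p = some a) :
    pvStepK ks p = if a ∈ ks then ks else ks ++ [a] := by unfold pvStepK; rw [h]

theorem pv_mem_foldl_stepK (papers : List (List (String × String))) (acc : List String) (m : String) :
    m ∈ papers.foldl pvStepK acc ↔ m ∈ acc ∨ some m ∈ papers.map pvClassify := by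
  induction papers generalizing acc with
  | nil => simp
  | cons p t ih =>
    rw [List.foldl_cons, ih, List.map_cons, List.mem_cons]
    cases hc : pvClassify p with
    | none =>
      rw [pvStepK_none _ _ hc]
      constructor
      · rintro (h | h)
        exacts [Or.inl h, Or.inr (Or.inr h)]
      · rintro (h | h | h)
        exacts [Or.inl h, absurd h (Option.some_ne_none m), Or.inr h]
    | some a =>
      rw [pvStepK_some _ _ _ hc]
      by_cases ha : a ∈ acc
      · rw [if_pos ha]
        constructor
        · rintro (h | h)
          exacts [Or.inl h, Or.inr (Or.inr h)]
        · rintro (h | h | h)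
          exacts [Or.inl h, Or.inl (by rwa [Option.some_inj.mp h]), Or.inr h]
      · rw [if_neg ha, List.mem_append, List.mem_singleton]
        constructor
        · rintro ((h | h) | h)
          exacts [Or.inl h, Or.inr (Or.inl (by rw [h])), Or.inr (Or.inr h)]
        · rintro (h | h | h)
          exacts [Or.inl (Or.inl h), Or.inl (Or.inr (Option.some_inj.mp h)), Or.inr h]

theorem pv_nodup_foldl_stepK (papers : List (List (String × String))) (acc : List String) (h : acc.Nodup) :
    (papers.foldl pvStepK acc).Nodup := by
  induction papers generalizing acc with
  | nil => exact h
  | cons p t ih =>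
    rw [List.foldl_cons]
    apply ih
    cases hc : pvClassify p with
    | none => rw [pvStepK_none _ _ hc]; exact h
    | some a =>
      rw [pvStepK_some _ _ _ hc]
      by_cases ha : a ∈ acc
      · rw [if_pos ha]; exact h
      · rw [if_neg ha, List.nodup_append]
        refine ⟨h, List.nodup_singleton _, ?_⟩
        intro x hx y hy
        rw [List.mem_singleton] at hy
        subst hy
        exact fun e => ha (e ▸ hx)

theorem pv_keys_append (t : List (List (String × String))) (p : List (String × String)) :
    pvKeys (t ++ [p]) = pvStepK (pvKeys t) p := by
  unfold pvKeys
  rw [List.foldl_append, List.foldl_cons, List.foldl_nil]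

theorem pv_bucket_append (t : List (List (String × String))) (p : List (String × String)) (m : String) :
    pvBucket (t ++ [p]) m = pvBucket t m ++ (if (pvClassify p == some m) = true then [p] else []) := by
  unfold pvBucket
  rw [List.filter_append, List.filter_singleton, Bool.cond_eq_ite]

theorem pv_keys_nodup (t : List (List (String × String))) : (pvKeys t).Nodup :=
  pv_nodup_foldl_stepK t [] List.nodup_nil

theorem pv_mem_keys (t : List (List (String × String))) (m : String) :
    m ∈ pvKeys t ↔ some m ∈ t.map pvClassify := by
  unfold pvKeys; rw [pv_mem_foldl_stepK]; simp

theorem pv_mk_keys (t : List (List (String × String))) :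
    (PySem.Dict.mk ((pvKeys t).map (fun m => (m, pvBucket t m)))).keys = pvKeys t := by
  simp only [PySem.Dict.keys, List.map_map]
  rw [show ((fun x : String × List (List (String × String)) => x.1) ∘ fun m => (m, pvBucket t m)) = (id : String → String) from rfl, List.map_id]

theorem pvAdd_of_contains (g : PySem.Dict String (List (List (String × String)))) (a : String)
    (p : List (String × String)) (h : g.contains a = true) :
    pvAdd g a p = g.insert a (g.getD a [] ++ [p]) := by
  unfold pvAdd
  dsimp only
  rw [if_pos h]

theorem pvAdd_of_not_contains (g : PySem.Dict String (List (List (String × String)))) (a : String)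
    (p : List (String × String)) (h : g.contains a = false) :
    pvAdd g a p = (g.insert a []).insert a ((g.insert a []).getD a [] ++ [p]) := by
  unfold pvAdd
  dsimp only
  rw [if_neg (by rw [h]; exact Bool.false_ne_true)]

theorem pv_main (papers : List (List (String × String))) :
    papers.foldl pvStepA PySem.Dict.empty =
      PySem.Dict.mk ((pvKeys papers).map (fun m => (m, pvBucket papers m))) := by
  induction papers using List.reverseRecOn with
  | nil => rfl
  | append_singleton t p ih =>
    rw [List.foldl_append, List.foldl_cons, List.foldl_nil, ih, pvStepA_eq]
    cases hc : pvClassify p with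
    | none =>
      dsimp only
      rw [pv_keys_append, pvStepK_none _ _ hc]
      congr 1
      apply List.map_congr_left
      intro k hk
      have hf : ((pvClassify p == some k) = false) := by rw [hc]; rfl
      rw [pv_bucket_append, hf, if_neg Bool.false_ne_true, List.append_nil]
    | some a =>
      dsimp only
      rw [pv_keys_append, pvStepK_some _ _ _ hc]
      have hkeys := pv_mk_keys t
      have hnodup : (PySem.Dict.mk ((pvKeys t).map (fun m => (m, pvBucket t m)))).keys.Nodup := by
        rw [hkeys]; exact pv_keys_nodup t
      by_cases ha : a ∈ pvKeys t
      · rw [if_pos ha]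
        have hcont : (PySem.Dict.mk ((pvKeys t).map (fun m => (m, pvBucket t m)))).contains a = true :=
          (PySem.Dict.contains_iff_mem_keys _ _).mpr (by rw [hkeys]; exact ha)
        have hget : (PySem.Dict.mk ((pvKeys t).map (fun m => (m, pvBucket t m)))).get? a = some (pvBucket t a) :=
          PySem.Dict.get?_of_mem_items _ (List.mem_map.mpr ⟨a, ha, rfl⟩) hnodup
        rw [pvAdd_of_contains _ _ _ hcont]
        rw [PySem.Dict.getD_eq_get?_getD, hget]
        apply PySem.Dict.ext
        rw [PySem.Dict.items_insert_of_contains _ _ hcont]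
        show ((pvKeys t).map (fun m => (m, pvBucket t m))).map _ = (pvKeys t).map _
        rw [List.map_map]
        apply List.map_congr_left
        intro k hk
        by_cases hka : k = a
        · subst hka
          show (if (k == k) = true then (k, (some (pvBucket t k)).getD [] ++ [p]) else (k, pvBucket t k)) = _
          rw [if_pos (beq_self_eq_true k)]
          have hbt : ((pvClassify p == some k) = true) := by rw [hc]; exact beq_self_eq_true _
          rw [pv_bucket_append, hbt, if_pos rfl]
          rfl
        · show (if (k == a) = true then _ else (k, pvBucket t k)) = _
          rw [if_neg (by rw [beq_eq_false_iff_ne.mpr hka]; exact Bool.false_ne_true)]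
          have hbf : ((pvClassify p == some k) = false) := by
            rw [hc]
            exact beq_eq_false_iff_ne.mpr (fun e => hka (Option.some_inj.mp e).symm)
          rw [pv_bucket_append, hbf, if_neg Bool.false_ne_true, List.append_nil]
      · rw [if_neg ha]
        have hcont : (PySem.Dict.mk ((pvKeys t).map (fun m => (m, pvBucket t m)))).contains a = false := by
          rw [Bool.eq_false_iff]
          intro h
          exact ha (by rw [← hkeys]; exact (PySem.Dict.contains_iff_mem_keys _ _).mp h)
        rw [pvAdd_of_not_contains _ _ _ hcont]
        rw [PySem.Dict.getD_eq_get?_getD, PySem.Dict.get?_insert_self]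
        have hcont2 := PySem.Dict.contains_insert_self (PySem.Dict.mk ((pvKeys t).map (fun m => (m, pvBucket t m)))) a ([] : List (List (String × String)))
        apply PySem.Dict.ext
        rw [PySem.Dict.items_insert_of_contains _ _ hcont2]
        rw [PySem.Dict.items_insert_of_not_contains _ _ hcont]
        rw [List.map_append, List.map_append]
        congr 1
        · show ((pvKeys t).map (fun m => (m, pvBucket t m))).map _ = (pvKeys t).map _
          rw [List.map_map]
          apply List.map_congr_left
          intro k hk
          have hka : k ≠ a := fun e => ha (e ▸ hk)
          show (if (k == a) = true then _ else (k, pvBucket t k)) = _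
          rw [if_neg (by rw [beq_eq_false_iff_ne.mpr hka]; exact Bool.false_ne_true)]
          have hbf : ((pvClassify p == some k) = false) := by
            rw [hc]
            exact beq_eq_false_iff_ne.mpr (fun e => hka (Option.some_inj.mp e).symm)
          rw [pv_bucket_append, hbf, if_neg Bool.false_ne_true, List.append_nil]
        · have hempty : pvBucket t a = [] := by
            unfold pvBucket
            rw [List.filter_eq_nil_iff]
            intro q hq hbeq
            exact ha ((pv_mem_keys t a).mpr (List.mem_map.mpr ⟨q, hq, beq_iff_eq.mp hbeq⟩))
          have hbt : ((pvClassify p == some a) = true) := by rw [hc]; exact beq_self_eq_true _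
          rw [List.map_singleton, List.map_singleton]
          dsimp only
          rw [if_pos (beq_self_eq_true a), pv_bucket_append, hbt, if_pos rfl, hempty]
          rfl

-- ===== VERDICT (by name: the statement is the Claim_ definition above) =====
theorem group_by_methodology_py_spec : Claim_equal_group_by_methodology_py := by
  intro papers _
  unfold Spec_group_by_methodology_py
  show group_by_methodology_py papers = group_by_methodology_py_alt papers
  exact congrArg PySem.Dict.items (pv_main papers)
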